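-- pv_equiv track=rewrite | github.com/m2i-duo/ara-pos-tagger-api | app/utils/preprocessing.py | map_pos_to_numerical
-- ===== SOURCE A (Python) =====
-- def map_pos_to_numerical(pos_tags):
--     pos_to_numerical = {}
--     numerical_pos_tags = []
--
--     for tags in pos_tags:
--         for tag in tags:
--             if tag not in pos_to_numerical:
--                 pos_to_numerical[tag] = len(pos_to_numerical)
--
--     numerical_pos_tags = [[pos_to_numerical[tag] for tag in tags] for tags in pos_tags]
--
--     return pos_to_numerical, numerical_pos_tags
-- ===== SOURCE B (Python) =====
-- def map_pos_to_numerical(pos_tags):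
--     pos_to_numerical = {}
--     numerical_pos_tags = []
--     for tags in pos_tags:
--         row = []
--         for tag in tags:
--             row.append(pos_to_numerical.setdefault(tag, len(pos_to_numerical)))
--         numerical_pos_tags.append(row)
--     return pos_to_numerical, numerical_pos_tags
-- ===== Notes on version B (the rewrite author's own statement) =====
-- stated objective: simpler
-- what changed: B fuses A's two nested scans (one pass building the tag index, a second list-comprehension pass converting every row) into a single interleaved traversal that assigns an index on first sight via dict.setdefault and emits the converted row immediately.
import Mathlib
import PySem

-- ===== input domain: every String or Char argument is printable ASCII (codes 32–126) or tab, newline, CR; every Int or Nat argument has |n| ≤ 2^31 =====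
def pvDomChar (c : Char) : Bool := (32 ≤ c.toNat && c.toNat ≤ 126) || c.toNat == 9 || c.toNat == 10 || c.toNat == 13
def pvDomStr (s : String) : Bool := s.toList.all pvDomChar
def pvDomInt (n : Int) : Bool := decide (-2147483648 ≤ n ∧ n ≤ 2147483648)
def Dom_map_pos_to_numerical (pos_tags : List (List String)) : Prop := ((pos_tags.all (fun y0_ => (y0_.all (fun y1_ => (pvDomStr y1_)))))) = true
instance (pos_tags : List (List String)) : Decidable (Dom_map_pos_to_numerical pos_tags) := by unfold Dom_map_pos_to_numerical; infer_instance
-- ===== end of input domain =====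

-- B fuses A's two nested scans (index building, then a second conversion pass) into one
-- interleaved traversal using setdefault; same return value, objective: simpler.

-- ===== PORT A =====
-- 'if tag not in d: d[tag] = len(d)'
def pvStepA (d : PySem.Dict String Int) (tag : String) : PySem.Dict String Int :=
  if d.contains tag then d else d.insert tag (d.size : Int)

def map_pos_to_numerical (pos_tags : List (List String)) : (List (String × Int)) × List (List Int) :=
  let pos_to_numerical :=
    pos_tags.foldl (fun d tags => tags.foldl pvStepA d) PySem.Dict.empty
  let numerical_pos_tags :=
    pos_tags.map (fun tags => tags.map (fun tag => pos_to_numerical.getD tag 0))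
  (pos_to_numerical.items, numerical_pos_tags)

-- ===== PORT B =====
-- 'row.append(d.setdefault(tag, len(d)))': setdefault, step for step
def pvStepB (st : PySem.Dict String Int × List Int) (tag : String) :
    PySem.Dict String Int × List Int :=
  match st.1.get? tag with
  | some v => (st.1, st.2 ++ [v])
  | none => (st.1.insert tag (st.1.size : Int), st.2 ++ [(st.1.size : Int)])

def pvRowB (st : PySem.Dict String Int × List (List Int)) (tags : List String) :
    PySem.Dict String Int × List (List Int) :=
  let inner := tags.foldl pvStepB (st.1, [])
  (inner.1, st.2 ++ [inner.2])

def map_pos_to_numerical_alt (pos_tags : List (List String)) : (List (String × Int)) × List (List Int) :=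
  let r := pos_tags.foldl pvRowB (PySem.Dict.empty, [])
  (r.1.items, r.2)

-- ===== PRECONDITION & SPEC =====
def Spec_map_pos_to_numerical (pos_tags : List (List String)) (out : (List (String × Int)) × List (List Int)) : Prop := out = map_pos_to_numerical_alt pos_tags
instance (pos_tags : List (List String)) (out : (List (String × Int)) × List (List Int)) : Decidable (Spec_map_pos_to_numerical pos_tags out) := by unfold Spec_map_pos_to_numerical; infer_instance

-- ===== CLAIM (what is proved, stated in full; the proofs are below) =====
def Claim_equal_map_pos_to_numerical : Prop := ∀ (pos_tags : List (List String)), Dom_map_pos_to_numerical pos_tags → Spec_map_pos_to_numerical pos_tags (map_pos_to_numerical pos_tags)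

-- ===== LEMMAS AND PROOFS =====

-- the final dict never changes a binding that is already present
theorem pv_mono (ts : List String) (d : PySem.Dict String Int) (k : String)
    (h : (d.get? k).isSome) : (ts.foldl pvStepA d).get? k = d.get? k := by
  induction ts generalizing d with
  | nil => rfl
  | cons t ts ih =>
    simp only [List.foldl_cons]
    by_cases hc : d.contains t = true
    · rw [show pvStepA d t = d from by unfold pvStepA; rw [hc]; rfl]
      exact ih d h
    · have hne : k ≠ t := by
        intro hkt; subst hkt
        rw [PySem.Dict.contains_eq_isSome_get?, h] at hc
        exact hc rfl
      rw [show pvStepA d t = d.insert t (d.size : Int) from by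
            unfold pvStepA; rw [eq_false_of_ne_true hc]; rfl]
      rw [ih (d.insert t (d.size : Int)) (by rw [PySem.Dict.get?_insert_of_ne _ _ hne]; exact h)]
      exact PySem.Dict.get?_insert_of_ne _ _ hne

theorem pv_mono_nested (ls : List (List String)) (d : PySem.Dict String Int) (k : String)
    (h : (d.get? k).isSome) :
    (ls.foldl (fun d tags => tags.foldl pvStepA d) d).get? k = d.get? k := by
  induction ls generalizing d with
  | nil => rfl
  | cons ts ls ih =>
    simp only [List.foldl_cons]
    rw [ih _ (by rw [pv_mono ts d k h]; exact h), pv_mono ts d k h]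

theorem pv_mem_isSome (ts : List String) (d : PySem.Dict String Int) (tag : String)
    (h : tag ∈ ts) : ((ts.foldl pvStepA d).get? tag).isSome := by
  induction ts generalizing d with
  | nil => cases h
  | cons t ts ih =>
    simp only [List.foldl_cons]
    rcases List.mem_cons.mp h with rfl | hmem
    · have hsome : ((pvStepA d tag).get? tag).isSome := by
        unfold pvStepA
        split_ifs with hc
        · rwa [PySem.Dict.contains_eq_isSome_get?] at hc
        · rw [PySem.Dict.get?_insert_self]; rfl
      rw [pv_mono ts (pvStepA d tag) tag hsome]; exact hsome
    · exact ih _ hmem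

-- the fused inner loop equals: build the dict over the row, then look every tag up
theorem pv_inner (ts : List String) (d : PySem.Dict String Int) (acc : List Int) :
    ts.foldl pvStepB (d, acc) =
      (ts.foldl pvStepA d,
       acc ++ ts.map (fun tag => (ts.foldl pvStepA d).getD tag 0)) := by
  induction ts generalizing d acc with
  | nil => simp
  | cons t ts ih =>
    simp only [List.foldl_cons, List.map_cons]
    rcases hv : d.get? t with _ | v
    · -- new tag: inserted with index d.size
      have hc : d.contains t = false := by
        rw [PySem.Dict.contains_eq_isSome_get?, hv]; rfl
      have hA : pvStepA d t = d.insert t (d.size : Int) := by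
        unfold pvStepA; rw [hc]; rfl
      have hB : pvStepB (d, acc) t = (d.insert t (d.size : Int), acc ++ [(d.size : Int)]) := by
        unfold pvStepB; rw [hv]
      rw [hB, ih, hA]
      have hfin : (ts.foldl pvStepA (d.insert t (d.size : Int))).getD t 0 = (d.size : Int) := by
        rw [PySem.Dict.getD_eq_get?_getD,
            pv_mono ts _ t (by rw [PySem.Dict.get?_insert_self]; rfl),
            PySem.Dict.get?_insert_self]
        rfl
      rw [hfin]; simp
    · -- known tag: its value survives to the final dict
      have hc : d.contains t = true := by
        rw [PySem.Dict.contains_eq_isSome_get?, hv]; rfl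
      have hA : pvStepA d t = d := by unfold pvStepA; rw [hc]; rfl
      have hB : pvStepB (d, acc) t = (d, acc ++ [v]) := by
        unfold pvStepB; rw [hv]
      rw [hB, ih, hA]
      have hfin : (ts.foldl pvStepA d).getD t 0 = v := by
        rw [PySem.Dict.getD_eq_get?_getD, pv_mono ts d t (by rw [hv]; rfl), hv]; rfl
      rw [hfin]; simp

-- the fused outer loop equals: build the full dict, then convert every row with it
theorem pv_outer (ls : List (List String)) (d : PySem.Dict String Int) (acc : List (List Int)) :
    ls.foldl pvRowB (d, acc) =
      (ls.foldl (fun d tags => tags.foldl pvStepA d) d,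
       acc ++ ls.map (fun ts => ts.map (fun tag =>
         (ls.foldl (fun d tags => tags.foldl pvStepA d) d).getD tag 0))) := by
  induction ls generalizing d acc with
  | nil => simp
  | cons ts ls ih =>
    simp only [List.foldl_cons, List.map_cons]
    have hrow : pvRowB (d, acc) ts =
        (ts.foldl pvStepA d,
         acc ++ [ts.map (fun tag => (ts.foldl pvStepA d).getD tag 0)]) := by
      unfold pvRowB; rw [pv_inner]; simp
    rw [hrow, ih]
    have hmap : ts.map (fun tag => (ts.foldl pvStepA d).getD tag 0) =
        ts.map (fun tag =>
          (ls.foldl (fun d tags => tags.foldl pvStepA d) (ts.foldl pvStepA d)).getD tag 0) := by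
      apply List.map_congr_left
      intro tag hmem
      rw [PySem.Dict.getD_eq_get?_getD,
          PySem.Dict.getD_eq_get?_getD,
          pv_mono_nested ls _ tag (pv_mem_isSome ts d tag hmem)]
    rw [hmap]; simp

-- ===== VERDICT (by name: the statement is the Claim_ definition above) =====
theorem map_pos_to_numerical_spec : Claim_equal_map_pos_to_numerical := by
  intro pos_tags _
  unfold Spec_map_pos_to_numerical map_pos_to_numerical map_pos_to_numerical_alt
  rw [pv_outer]
  simp
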